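-- pv_equiv track=rewrite | github.com/wherby/code | contest/00000c443d154/c470/q4/t4 copy.py | countNoZeroPairs
-- ===== SOURCE A (Python) =====
-- from functools import cache
--
-- def countNoZeroPairs(n: int) -> int:
--     s = str(n)
--     m = len(s)
--
--     @cache
--     def f(i,c,za,zb):
--         if i ==m:
--             return 1 if c ==0 and (za ==False and zb ==False) else 0
--         res =0
--         d= int(s[i]) +10*c
--         fa = 0 if za else 1
--         fb = 0 if zb else 1
--         for nc in range(2):
--             for a in range(fa,10):
--                 for b in range(fb,10):
--                     if (a+b+nc) ==d:
--                         res += f(i+1,nc,za and a ==0 ,zb and b==0)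
--         return res
--
--
--
--     return f(0,0,True,True)
-- ===== SOURCE B (Python) =====
-- def countNoZeroPairs(n: int) -> int:
--     digits = [int(ch) for ch in str(n)]
--     # base layer: the DP values past the last digit
--     layer = {(c, za, zb): (1 if (c == 0 and not za and not zb) else 0)
--              for c in (0, 1) for za in (False, True) for zb in (False, True)}
--     for dg in reversed(digits):
--         new = {}
--         for c in (0, 1):
--             d = dg + 10 * c
--             for za in (False, True):
--                 for zb in (False, True):
--                     total = 0
--                     for nc in (0, 1):
--                         for a in range(0 if za else 1, 10):
--                             b = d - nc - a
--                             if (0 if zb else 1) <= b <= 9: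
--                                 total += layer[(nc, za and a == 0, zb and b == 0)]
--                     new[(c, za, zb)] = total
--         layer = new
--     return layer[(0, True, True)]
-- ===== Notes on version B (the rewrite author's own statement) =====
-- stated objective: alternative
-- what changed: Replaces A's @cache memoized top-down digit recursion by an explicit bottom-up DP: an eight-cell table folded over the digits right-to-left, and the inner loop over the second digit b is eliminated by computing b = d - nc - a directly with a range check.
import Mathlib
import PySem

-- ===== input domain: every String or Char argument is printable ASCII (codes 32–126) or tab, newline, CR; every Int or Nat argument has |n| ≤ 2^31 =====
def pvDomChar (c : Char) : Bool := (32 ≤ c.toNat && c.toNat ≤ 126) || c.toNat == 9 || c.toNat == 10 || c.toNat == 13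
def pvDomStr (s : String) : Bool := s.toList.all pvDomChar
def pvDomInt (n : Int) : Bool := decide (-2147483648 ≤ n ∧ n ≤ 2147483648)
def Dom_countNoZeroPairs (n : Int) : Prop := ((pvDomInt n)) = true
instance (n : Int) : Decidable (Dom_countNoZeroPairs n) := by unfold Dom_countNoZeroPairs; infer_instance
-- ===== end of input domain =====

-- B replaces A's @cache top-down digit recursion by an explicit bottom-up DP table (eight cells) folded
-- over the digits right-to-left, with the matching digit b computed directly instead of
-- searched by an inner loop (objective: alternative; same asymptotic cost).

-- ===== PORT A =====
-- int(s[i]) on a single character (Pre_ keeps n ≥ 0, so the character is a digit and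
-- int() cannot raise; the getD 0 default is never reached inside Pre_).
def pvDigitA (ch : Char) : Int := (PySem.Int.ofStr? (String.ofList [ch])).getD 0

-- the digit string s of A, read as the list of int(s[i]) (A re-reads int(s[i]) at each
-- recursion depth i; carrying the list of those values and consuming it head-first is the
-- structural rendering of indexing s by i)
def pvDigitsA (n : Int) : List Int := (PySem.Int.toStr n).toList.map pvDigitA

-- the iteration space of A's three nested loops 'for nc in range(2): for a in range(fa,10): for b in range(fb,10)'
def pvTriples (fa fb : Int) : List (Int × Int × Int) :=
  (PySem.List.pyRange 0 2 1).flatMap fun nc =>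
    (PySem.List.pyRange fa 10 1).flatMap fun a =>
      (PySem.List.pyRange fb 10 1).map fun b => (nc, a, b)

-- A's cached recursion f(i,c,za,zb): the @cache dict is threaded explicitly (keyed by the
-- remaining digit suffix, which is in bijection with Python's index i for the fixed s)
def pvFA (ds : List Int) (c : Int) (za zb : Bool)
    (memo : PySem.Dict (List Int × Int × Bool × Bool) Int) :
    Int × PySem.Dict (List Int × Int × Bool × Bool) Int :=
  match memo.get? (ds, c, za, zb) with
  | some v => (v, memo)
  | none =>
    match ds with
    | [] =>
      let r : Int := if c = 0 ∧ za = false ∧ zb = false then 1 else 0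
      (r, memo.insert (([] : List Int), c, za, zb) r)
    | d0 :: rest =>
      let d := d0 + 10 * c
      let fa : Int := if za then 0 else 1
      let fb : Int := if zb then 0 else 1
      let p := (pvTriples fa fb).foldl
        (fun st t =>
          if t.2.1 + t.2.2 + t.1 = d then
            let q := pvFA rest t.1 (za && (t.2.1 == 0)) (zb && (t.2.2 == 0)) st.2
            (st.1 + q.1, q.2)
          else st)
        ((0 : Int), memo)
      (p.1, p.2.insert (d0 :: rest, c, za, zb) p.1)
termination_by ds.length
decreasing_by simp

def countNoZeroPairs (n : Int) : Int :=
  (pvFA (pvDigitsA n) 0 true true PySem.Dict.empty).1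

-- ===== PORT B =====
def pvDigitB (ch : Char) : Int := (PySem.Int.ofStr? (String.ofList [ch])).getD 0

def pvDigitsB (n : Int) : List Int := (PySem.Int.toStr n).toList.map pvDigitB

def pvCs : List Int := [0, 1]
def pvBools : List Bool := [false, true]

-- the base layer {(c, za, zb): 1 if c == 0 and not za and not zb else 0 ...}
def pvBase : PySem.Dict (Int × Bool × Bool) Int :=
  pvCs.foldl (fun dct c => pvBools.foldl (fun dct za => pvBools.foldl (fun dct zb =>
    dct.insert (c, za, zb) (if c = 0 ∧ za = false ∧ zb = false then 1 else 0)) dct) dct)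
    PySem.Dict.empty

-- total for one cell: 'for nc in (0,1): for a in range(...,10): b = d-nc-a; if ... : total += layer[...]'
def pvInner (layer : PySem.Dict (Int × Bool × Bool) Int) (d : Int) (za zb : Bool) : Int :=
  pvCs.foldl (fun tot nc =>
    (PySem.List.pyRange (if za then 0 else 1) 10 1).foldl (fun tot a =>
      let b := d - nc - a
      if (if zb then (0 : Int) else 1) ≤ b ∧ b ≤ 9 then
        tot + (layer.get? (nc, za && (a == 0), zb && (b == 0))).getD 0
      else tot) tot) 0

-- one pass of 'for dg in reversed(digits)': build the new layer from the old one
def pvStep (layer : PySem.Dict (Int × Bool × Bool) Int) (dg : Int) :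
    PySem.Dict (Int × Bool × Bool) Int :=
  pvCs.foldl (fun new c => pvBools.foldl (fun new za => pvBools.foldl (fun new zb =>
    new.insert (c, za, zb) (pvInner layer (dg + 10 * c) za zb)) new) new)
    PySem.Dict.empty

def countNoZeroPairs_alt (n : Int) : Int :=
  (((pvDigitsB n).reverse.foldl pvStep pvBase).get? (0, true, true)).getD 0

-- ===== PRECONDITION & SPEC =====
-- Pre_ excludes exactly the negative n, on which Python A raises ValueError (int('-')).
def Pre_countNoZeroPairs (n : Int) : Prop := 0 ≤ n
instance (n : Int) : Decidable (Pre_countNoZeroPairs n) := by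
  unfold Pre_countNoZeroPairs; infer_instance

def pvWitness_countNoZeroPairs : Int := 12

def Spec_countNoZeroPairs (n : Int) (out : Int) : Prop := out = countNoZeroPairs_alt n
instance (n : Int) (out : Int) : Decidable (Spec_countNoZeroPairs n out) := by
  unfold Spec_countNoZeroPairs; infer_instance

-- ===== CLAIM (what is proved, stated in full; the proofs are below) =====
def Claim_equal_countNoZeroPairs : Prop :=
  ∀ (n : Int), Dom_countNoZeroPairs n → Pre_countNoZeroPairs n →
    Spec_countNoZeroPairs n (countNoZeroPairs n)

-- ===== LEMMAS AND PROOFS =====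

-- the plain (uncached) value of A's recursion: the common reference point of both proofs
def pvF (ds : List Int) (c : Int) (za zb : Bool) : Int :=
  match ds with
  | [] => if c = 0 ∧ za = false ∧ zb = false then 1 else 0
  | d0 :: rest =>
    (pvTriples (if za then 0 else 1) (if zb then 0 else 1)).foldl
      (fun res t =>
        if t.2.1 + t.2.2 + t.1 = d0 + 10 * c then
          res + pvF rest t.1 (za && (t.2.1 == 0)) (zb && (t.2.2 == 0))
        else res) 0

-- memo invariant: every cached value is the pure value of its key
def pvInv (memo : PySem.Dict (List Int × Int × Bool × Bool) Int) : Prop :=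
  ∀ ds c za zb v, memo.get? (ds, c, za, zb) = some v → v = pvF ds c za zb

theorem pvInv_empty : pvInv PySem.Dict.empty := by
  intro ds c za zb v h
  simp [PySem.Dict.get?_empty] at h

theorem pvInv_insert {memo} (h : pvInv memo) (ds : List Int) (c : Int) (za zb : Bool)
    {v : Int} (hv : v = pvF ds c za zb) :
    pvInv (memo.insert (ds, c, za, zb) v) := by
  intro ds' c' za' zb' w hw
  rw [PySem.Dict.get?_insert] at hw
  by_cases heq : ((ds', c', za', zb') : List Int × Int × Bool × Bool) = (ds, c, za, zb)
  · rw [if_pos heq] at hw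
    simp only [Prod.mk.injEq] at heq
    obtain ⟨rfl, rfl, rfl, rfl⟩ := heq
    cases hw
    exact hv
  · rw [if_neg heq] at hw
    exact h _ _ _ _ _ hw

-- memo-threaded fold computes the pure fold and preserves the invariant
theorem pvFold_memo {α : Type} (P : α → Prop) [DecidablePred P]
    (fm : α → PySem.Dict (List Int × Int × Bool × Bool) Int →
          Int × PySem.Dict (List Int × Int × Bool × Bool) Int)
    (fp : α → Int)
    (h : ∀ x m, pvInv m → (fm x m).1 = fp x ∧ pvInv (fm x m).2) :
    ∀ (T : List α) (res : Int) memo, pvInv memo →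
      (T.foldl (fun st x => if P x then
          let q := fm x st.2
          (st.1 + q.1, q.2)
        else st) (res, memo)).1
        = T.foldl (fun r x => if P x then r + fp x else r) res ∧
      pvInv (T.foldl (fun st x => if P x then
          let q := fm x st.2
          (st.1 + q.1, q.2)
        else st) (res, memo)).2 := by
  intro T
  induction T with
  | nil => intro res memo hm; exact ⟨rfl, hm⟩
  | cons x T ih =>
    intro res memo hm
    by_cases hP : P x
    · simp only [List.foldl_cons, if_pos hP]
      exact ih _ _ (h x memo hm).2 |>.imp (fun e => by rw [e, (h x memo hm).1]) id
    · simp only [List.foldl_cons, if_neg hP]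
      exact ih _ _ hm

-- A's cached recursion computes pvF
theorem pvFA_correct : ∀ (ds : List Int) (c : Int) (za zb : Bool) memo, pvInv memo →
    (pvFA ds c za zb memo).1 = pvF ds c za zb ∧ pvInv (pvFA ds c za zb memo).2 := by
  intro ds
  induction ds with
  | nil =>
    intro c za zb memo hm
    rw [pvFA]
    cases hg : memo.get? (([] : List Int), c, za, zb) with
    | some v => exact ⟨hm _ _ _ _ _ hg, hm⟩
    | none =>
      refine ⟨rfl, ?_⟩
      exact pvInv_insert hm [] c za zb rfl
  | cons d0 rest ih =>
    intro c za zb memo hm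
    rw [pvFA]
    cases hg : memo.get? ((d0 :: rest : List Int), c, za, zb) with
    | some v => exact ⟨hm _ _ _ _ _ hg, hm⟩
    | none =>
      have hfold := pvFold_memo
        (fun t : Int × Int × Int => t.2.1 + t.2.2 + t.1 = d0 + 10 * c)
        (fun t m => pvFA rest t.1 (za && (t.2.1 == 0)) (zb && (t.2.2 == 0)) m)
        (fun t => pvF rest t.1 (za && (t.2.1 == 0)) (zb && (t.2.2 == 0)))
        (fun t m hminv => ih t.1 (za && (t.2.1 == 0)) (zb && (t.2.2 == 0)) m hminv)
        (pvTriples (if za then 0 else 1) (if zb then 0 else 1)) 0 memo hm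
      refine ⟨hfold.1.trans ?_, pvInv_insert hfold.2 (d0 :: rest) c za zb
        (hfold.1.trans ?_)⟩ <;>
      · conv_rhs => rw [pvF]

-- B side: a layer is good for a suffix if its cells hold the pure values
def pvGood (layer : PySem.Dict (Int × Bool × Bool) Int) (ds : List Int) : Prop :=
  ∀ c : Int, (c = 0 ∨ c = 1) → ∀ za zb : Bool,
    ((layer.get? (c, za, zb)).getD 0) = pvF ds c za zb

theorem pvBase_good : pvGood pvBase [] := by
  intro c hc za zb
  rcases hc with h | h <;> subst h <;> cases za <;> cases zb <;> decide

-- a fold adding g on a guard is the sum over the filtered list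
theorem pvFoldl_if_add {α : Type} (P : α → Prop) [DecidablePred P] (g : α → Int) :
    ∀ (l : List α) (a : Int),
      l.foldl (fun acc x => if P x then acc + g x else acc) a
        = a + ((l.filter (fun x => decide (P x))).map g).sum := by
  intro l
  induction l with
  | nil => intro a; simp
  | cons x l ih =>
    intro a
    by_cases hP : P x <;> simp [hP, ih, add_assoc]

theorem pvFoldl_flatMap {α β : Type} (f : α → List β) (g : Int → β → Int) :
    ∀ (l : List α) (init : Int),
      (l.flatMap f).foldl g init = l.foldl (fun acc x => (f x).foldl g acc) init := by
  intro l
  induction l with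
  | nil => intro init; simp
  | cons x l ih => intro init; simp [List.flatMap_cons, List.foldl_append, ih]

-- the inner b-loop of A finds at most one b, the one B computes directly
theorem pvSingle (g : Int → Int → Int → Int) (fb d nc a : Int) :
    ∀ tot : Int,
      (PySem.List.pyRange fb 10 1).foldl
        (fun tot b => if a + b + nc = d then tot + g nc a b else tot) tot
        = if fb ≤ d - nc - a ∧ d - nc - a ≤ 9 then tot + g nc a (d - nc - a) else tot := by
  intro tot
  rw [pvFoldl_if_add (fun b => a + b + nc = d) (fun b => g nc a b)]
  have hcongr : (PySem.List.pyRange fb 10 1).filter (fun b => decide (a + b + nc = d))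
      = (PySem.List.pyRange fb 10 1).filter (fun b => b == d - nc - a) := by
    apply List.filter_congr
    intro b _
    show decide (a + b + nc = d) = decide (b = d - nc - a)
    simp only [decide_eq_decide]
    omega
  rw [hcongr, List.filter_beq]
  by_cases hmem : d - nc - a ∈ PySem.List.pyRange fb 10 1
  · have h1 : (PySem.List.pyRange fb 10 1).count (d - nc - a) = 1 :=
      List.count_eq_one_of_mem (PySem.List.nodup_pyRange_one _ _) hmem
    rw [PySem.List.mem_pyRange_one] at hmem
    rw [h1, if_pos (by omega)]
    simp
  · have h0 : (PySem.List.pyRange fb 10 1).count (d - nc - a) = 0 :=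
      List.count_eq_zero_of_not_mem hmem
    rw [PySem.List.mem_pyRange_one] at hmem
    rw [h0, if_neg (by omega)]
    simp

-- A's triple loop with the sum filter equals B's direct computation of b
theorem pvTriple_eq (g : Int → Int → Int → Int) (fa fb d : Int) :
    (pvTriples fa fb).foldl
      (fun res t => if t.2.1 + t.2.2 + t.1 = d then res + g t.1 t.2.1 t.2.2 else res) 0
    = ([0, 1] : List Int).foldl (fun tot nc =>
        (PySem.List.pyRange fa 10 1).foldl (fun tot a =>
          if fb ≤ d - nc - a ∧ d - nc - a ≤ 9 then tot + g nc a (d - nc - a) else tot)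
          tot) 0 := by
  have h01 : PySem.List.pyRange 0 2 1 = [0, 1] := by decide
  unfold pvTriples
  rw [h01, pvFoldl_flatMap]
  apply PySem.List.foldl_congr_mem
  intro acc nc _
  rw [pvFoldl_flatMap]
  apply PySem.List.foldl_congr_mem
  intro acc' a _
  rw [List.foldl_map]
  exact pvSingle g fb d nc a acc'

-- reading a cell of the new layer built by pvStep
theorem pvStep_get (layer : PySem.Dict (Int × Bool × Bool) Int) (dg : Int)
    (c : Int) (hc : c = 0 ∨ c = 1) (za zb : Bool) :
    (((pvStep layer dg).get? (c, za, zb)).getD 0)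
      = pvInner layer (dg + 10 * c) za zb := by
  rcases hc with rfl | rfl <;> cases za <;> cases zb <;>
    simp [pvStep, pvCs, pvBools, PySem.Dict.get?_insert]

theorem pvStep_good {layer rest} (h : pvGood layer rest) (dg : Int) :
    pvGood (pvStep layer dg) (dg :: rest) := by
  intro c hc za zb
  rw [pvStep_get layer dg c hc za zb]
  conv_rhs => rw [pvF]
  rw [pvTriple_eq (fun nc a b => pvF rest nc (za && (a == 0)) (zb && (b == 0)))
    (if za then 0 else 1) (if zb then 0 else 1) (dg + 10 * c)]
  simp only [pvInner, pvCs]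
  apply PySem.List.foldl_congr_mem
  intro acc nc hnc
  apply PySem.List.foldl_congr_mem
  intro acc' a _
  have hnc' : nc = 0 ∨ nc = 1 := by
    simp only [List.mem_cons, List.not_mem_nil, or_false] at hnc
    tauto
  by_cases hb : (if zb then (0 : Int) else 1) ≤ dg + 10 * c - nc - a ∧
      dg + 10 * c - nc - a ≤ 9
  · simp only [if_pos hb]
    rw [h nc hnc' (za && (a == 0)) (zb && ((dg + 10 * c - nc - a) == 0))]
  · simp only [if_neg hb]

theorem pvAlt_good : ∀ ds : List Int, pvGood (ds.reverse.foldl pvStep pvBase) ds := by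
  intro ds
  induction ds with
  | nil => exact pvBase_good
  | cons d0 rest ih =>
    have : (d0 :: rest).reverse.foldl pvStep pvBase
        = pvStep (rest.reverse.foldl pvStep pvBase) d0 := by
      simp [List.foldl_append]
    rw [this]
    exact pvStep_good ih d0

-- ===== VERDICT (by name: the statement is the Claim_ definition above) =====
theorem countNoZeroPairs_spec : Claim_equal_countNoZeroPairs := by
  intro n _ _
  unfold Spec_countNoZeroPairs countNoZeroPairs countNoZeroPairs_alt
  have hd : pvDigitsB n = pvDigitsA n := rfl
  rw [hd]
  rw [(pvFA_correct (pvDigitsA n) 0 true true PySem.Dict.empty pvInv_empty).1]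
  rw [pvAlt_good (pvDigitsA n) 0 (Or.inl rfl) true true]
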